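-- pv_equiv track=rewrite | github.com/cobbcristian/MedAI | ai_backend/services/medication_tracking.py | _analyze_side_effects
-- ===== SOURCE A (Python) =====
-- from typing import Dict, List, Any, Optional
--
-- def _analyze_side_effects(medication_name: str, side_effects: List[str], med_info: Dict[str, Any]) -> str:
--     """Analyze side effects and their severity"""
--     if not side_effects:
--         return "No significant side effects reported"
--
--     common_side_effects = med_info.get("common_side_effects", [])
--     serious_side_effects = med_info.get("serious_side_effects", [])
--
--     analysis_parts = []
--     severity_level = "mild"
--
--     for effect in side_effects:
--         effect_lower = effect.lower()
--
--         if any(serious in effect_lower for serious in serious_side_effects):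
--             analysis_parts.append(f"⚠️ SERIOUS: {effect}")
--             severity_level = "severe"
--         elif any(common in effect_lower for common in common_side_effects):
--             analysis_parts.append(f"Common: {effect}")
--             if severity_level == "mild":
--                 severity_level = "moderate"
--         else:
--             analysis_parts.append(f"Unusual: {effect}")
--
--     if severity_level == "severe":
--         analysis_parts.append("⚠️ Immediate medical attention may be needed")
--     elif severity_level == "moderate":
--         analysis_parts.append("Consider dosage adjustment or alternative medication")
--
--     return " | ".join(analysis_parts)
-- ===== SOURCE B (Python) =====
-- from typing import Dict, List, Any
--
-- def _hits(effect, terms):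
--     low = effect.lower()
--     return any(t in low for t in terms)
--
-- def _label(effect, serious, common):
--     if _hits(effect, serious):
--         return "\u26a0\ufe0f SERIOUS: " + effect
--     if _hits(effect, common):
--         return "Common: " + effect
--     return "Unusual: " + effect
--
-- def _render(lst, serious, common):
--     # direct string accumulation, no parts list and no join; only called on non-empty lists
--     out = _label(lst[0], serious, common)
--     for e in lst[1:]:
--         out += " | " + _label(e, serious, common)
--     return out
--
-- def _analyze_side_effects(medication_name: str, side_effects: List[str], med_info: Dict[str, Any]) -> str:
--     if not side_effects:
--         return "No significant side effects reported"
--     serious = med_info.get("serious_side_effects", [])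
--     common = med_info.get("common_side_effects", [])
--
--     # severity decided first by two independent whole-list scans
--     if any(_hits(e, serious) for e in side_effects):
--         tail = " | \u26a0\ufe0f Immediate medical attention may be needed"
--     elif any(_hits(e, common) for e in side_effects):
--         tail = " | Consider dosage adjustment or alternative medication"
--     else:
--         tail = ""
--
--     return _render(side_effects, serious, common) + tail
-- ===== Notes on version B (the rewrite author's own statement) =====
-- stated objective: alternative
-- what changed: A interleaves classification and severity tracking in one loop over a (parts list, severity string) accumulator and joins at the end; B decides severity first by two independent whole-list any-scans (serious, then common) picking an advisory tail, then builds the result string directly by concatenation (no parts list, no join, no threaded severity state).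
import Mathlib
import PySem

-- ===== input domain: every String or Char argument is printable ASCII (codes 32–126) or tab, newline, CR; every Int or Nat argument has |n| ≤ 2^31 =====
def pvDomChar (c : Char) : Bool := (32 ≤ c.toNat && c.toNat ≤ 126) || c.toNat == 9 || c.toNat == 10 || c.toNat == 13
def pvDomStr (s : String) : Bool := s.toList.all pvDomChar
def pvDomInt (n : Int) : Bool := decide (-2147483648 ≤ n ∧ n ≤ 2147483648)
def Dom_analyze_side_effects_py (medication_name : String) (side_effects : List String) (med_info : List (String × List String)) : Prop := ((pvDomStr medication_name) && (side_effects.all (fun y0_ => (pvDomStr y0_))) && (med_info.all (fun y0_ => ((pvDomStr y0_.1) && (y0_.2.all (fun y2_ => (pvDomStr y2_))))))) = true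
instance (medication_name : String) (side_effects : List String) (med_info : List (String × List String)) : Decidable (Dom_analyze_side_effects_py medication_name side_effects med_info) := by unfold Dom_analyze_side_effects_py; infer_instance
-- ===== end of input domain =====

-- B replaces A's single loop over a (parts, severity-string) accumulator by: severity decided
-- first via two independent any-scans picking an advisory tail, then the result string
-- built directly by string accumulation, without a parts list or join (objective: alternative decomposition).


-- ===== PORT A =====
-- loop body of A's for-loop over side_effects; state = (analysis_parts, severity_level)
def pvStepA (serious common : List String) (st : List String × String) (effect : String) : List String × String :=
  if serious.any (fun s => PySem.Str.isIn s (PySem.Str.lower effect)) then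
    (st.1 ++ ["⚠️ SERIOUS: " ++ effect], "severe")
  else if common.any (fun c => PySem.Str.isIn c (PySem.Str.lower effect)) then
    (st.1 ++ ["Common: " ++ effect], if st.2 = "mild" then "moderate" else st.2)
  else
    (st.1 ++ ["Unusual: " ++ effect], st.2)

def analyze_side_effects_py (medication_name : String) (side_effects : List String) (med_info : List (String × List String)) : String :=
  if side_effects = [] then "No significant side effects reported"
  else
    let common := (PySem.Dict.mk med_info).getD "common_side_effects" []
    let serious := (PySem.Dict.mk med_info).getD "serious_side_effects" []
    let st := side_effects.foldl (pvStepA serious common) ([], "mild")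
    let parts :=
      if st.2 = "severe" then st.1 ++ ["⚠️ Immediate medical attention may be needed"]
      else if st.2 = "moderate" then st.1 ++ ["Consider dosage adjustment or alternative medication"]
      else st.1
    PySem.Str.join " | " parts

-- ===== PORT B =====
-- _hits(effect, terms)
def pvHits (terms : List String) (effect : String) : Bool :=
  terms.any (fun t => PySem.Str.isIn t (PySem.Str.lower effect))

-- _label(effect, serious, common)
def pvLabel (serious common : List String) (effect : String) : String :=
  if pvHits serious effect then "⚠️ SERIOUS: " ++ effect
  else if pvHits common effect then "Common: " ++ effect
  else "Unusual: " ++ effect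

-- _render: direct string accumulation, no parts list and no join; only called on non-empty lists ([] case is dead)
def pvRender (serious common : List String) : List String → String
  | [] => ""
  | e :: rest => rest.foldl (fun out x => out ++ (" | " ++ pvLabel serious common x)) (pvLabel serious common e)

def analyze_side_effects_py_alt (medication_name : String) (side_effects : List String) (med_info : List (String × List String)) : String :=
  if side_effects = [] then "No significant side effects reported"
  else
    let serious := (PySem.Dict.mk med_info).getD "serious_side_effects" []
    let common := (PySem.Dict.mk med_info).getD "common_side_effects" []
    let tail :=
      if side_effects.any (pvHits serious) then " | ⚠️ Immediate medical attention may be needed"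
      else if side_effects.any (pvHits common) then " | Consider dosage adjustment or alternative medication"
      else ""
    pvRender serious common side_effects ++ tail

-- ===== PRECONDITION & SPEC =====
def Spec_analyze_side_effects_py (medication_name : String) (side_effects : List String) (med_info : List (String × List String)) (out : String) : Prop := out = analyze_side_effects_py_alt medication_name side_effects med_info
instance (medication_name : String) (side_effects : List String) (med_info : List (String × List String)) (out : String) : Decidable (Spec_analyze_side_effects_py medication_name side_effects med_info out) := by unfold Spec_analyze_side_effects_py; infer_instance

-- ===== CLAIM (what is proved, stated in full; the proofs are below) =====
def Claim_equal_analyze_side_effects_py : Prop := ∀ (medication_name : String) (side_effects : List String) (med_info : List (String × List String)), Dom_analyze_side_effects_py medication_name side_effects med_info → Spec_analyze_side_effects_py medication_name side_effects med_info (analyze_side_effects_py medication_name side_effects med_info)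

-- ===== LEMMAS AND PROOFS =====

-- one step of A's loop, phrased with B's helpers
theorem pvStepA_eq (serious common acc : List String) (sev e : String) :
    pvStepA serious common (acc, sev) e
      = (acc ++ [pvLabel serious common e],
         if pvHits serious e then "severe"
         else if pvHits common e then (if sev = "mild" then "moderate" else sev)
         else sev) := by
  simp only [pvStepA, pvLabel, pvHits]
  split_ifs <;> rfl

-- once A's severity is "severe" it stays "severe" and only parts accumulate
theorem pvFold_severe (serious common : List String) (sl : List String) :
    ∀ acc : List String,
    sl.foldl (pvStepA serious common) (acc, "severe")
      = (acc ++ sl.map (pvLabel serious common), "severe") := by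
  induction sl with
  | nil => intro acc; simp
  | cons e tl ih =>
    intro acc
    rw [List.foldl_cons, pvStepA_eq, List.map_cons]
    by_cases hs : pvHits serious e = true
    · rw [if_pos hs, ih]; simp
    · by_cases hc : pvHits common e = true
      · rw [if_neg hs, if_pos hc, if_neg (by decide : ¬("severe" : String) = "mild"), ih]; simp
      · rw [if_neg hs, if_neg hc, ih]; simp

-- from "moderate", severity becomes "severe" iff some remaining effect hits a serious term
theorem pvFold_moderate (serious common : List String) (sl : List String) :
    ∀ acc : List String,
    sl.foldl (pvStepA serious common) (acc, "moderate")
      = (acc ++ sl.map (pvLabel serious common),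
         if sl.any (pvHits serious) then "severe" else "moderate") := by
  induction sl with
  | nil => intro acc; simp
  | cons e tl ih =>
    intro acc
    rw [List.foldl_cons, pvStepA_eq, List.map_cons, List.any_cons]
    by_cases hs : pvHits serious e = true
    · rw [if_pos hs, pvFold_severe]; simp [hs]
    · by_cases hc : pvHits common e = true
      · rw [if_neg hs, if_pos hc, if_neg (by decide : ¬("moderate" : String) = "mild"), ih]
        simp [hs]
      · rw [if_neg hs, if_neg hc, ih]; simp [hs]

-- from the initial "mild" state, A's fold computes B's labels and B's two any-scans' verdict
theorem pvFold_mild (serious common : List String) (sl : List String) :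
    ∀ acc : List String,
    sl.foldl (pvStepA serious common) (acc, "mild")
      = (acc ++ sl.map (pvLabel serious common),
         if sl.any (pvHits serious) then "severe"
         else if sl.any (pvHits common) then "moderate" else "mild") := by
  induction sl with
  | nil => intro acc; simp
  | cons e tl ih =>
    intro acc
    rw [List.foldl_cons, pvStepA_eq, List.map_cons, List.any_cons, List.any_cons]
    by_cases hs : pvHits serious e = true
    · rw [if_pos hs, pvFold_severe]; simp [hs]
    · by_cases hc : pvHits common e = true
      · rw [if_neg hs, if_pos hc, if_pos (rfl : ("mild" : String) = "mild"), pvFold_moderate]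
        simp [hs, hc]
      · rw [if_neg hs, if_neg hc, ih]; simp [hs, hc]

-- " | ".join with one extra trailing piece appends " | " ++ piece (Chars level), list non-empty
theorem pvCharsJoin_append_one (sep t : List Char) (xs : List (List Char)) (h : xs ≠ []) :
    PySem.Chars.join sep (xs ++ [t]) = PySem.Chars.join sep xs ++ sep ++ t := by
  induction xs with
  | nil => exact absurd rfl h
  | cons e tl ih =>
    cases tl with
    | nil => simp [PySem.Chars.join_singleton, PySem.Chars.join_cons_cons]
    | cons f tl' =>
      have hrec := ih (by simp)
      simp only [List.cons_append, PySem.Chars.join_cons_cons] at hrec ⊢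
      rw [hrec]
      simp [List.append_assoc]

-- the same at the String level
theorem pvJoin_append_one (xs : List String) (t : String) (h : xs ≠ []) :
    PySem.Str.join " | " (xs ++ [t]) = PySem.Str.join " | " xs ++ (" | " ++ t) := by
  apply String.toList_inj.mp
  rw [PySem.Str.toList_join, List.map_append, String.toList_append, String.toList_append,
    PySem.Str.toList_join]
  simp only [List.map_cons, List.map_nil]
  rw [pvCharsJoin_append_one _ _ _ (by simpa using h)]
  simp [List.append_assoc]

-- the part of the rendered string contributed by the tail of the list
def pvSuffix (serious common : List String) : List String → String
  | [] => ""
  | e :: rest => (" | " ++ pvLabel serious common e) ++ pvSuffix serious common rest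

-- B's accumulator loop appends pvSuffix to its seed
theorem pvFoldStr (serious common : List String) (tl : List String) :
    ∀ s : String,
    tl.foldl (fun out x => out ++ (" | " ++ pvLabel serious common x)) s
      = s ++ pvSuffix serious common tl := by
  induction tl with
  | nil => intro s; simp [pvSuffix]
  | cons e tl' ih =>
    intro s
    rw [List.foldl_cons, ih, pvSuffix]
    simp [String.append_assoc]

-- " | ".join of the labels equals the head label followed by the tail's suffix
theorem pvJoin_labels_suffix (serious common : List String) (e : String) (tl : List String) :
    PySem.Str.join " | " ((e :: tl).map (pvLabel serious common))
      = pvLabel serious common e ++ pvSuffix serious common tl := by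
  induction tl generalizing e with
  | nil =>
    apply String.toList_inj.mp
    simp [PySem.Str.toList_join, PySem.Chars.join_singleton, pvSuffix]
  | cons f tl' ih =>
    apply String.toList_inj.mp
    have hrec := congrArg String.toList (ih f)
    rw [PySem.Str.toList_join] at hrec ⊢
    simp only [List.map_cons, PySem.Chars.join_cons_cons, String.toList_append,
      pvSuffix] at hrec ⊢
    rw [hrec]
    simp [List.append_assoc]

-- " | ".join of the labels IS B's render, for non-empty lists
theorem pvJoin_labels (serious common : List String) (sl : List String) (h : sl ≠ []) :
    PySem.Str.join " | " (sl.map (pvLabel serious common)) = pvRender serious common sl := by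
  cases sl with
  | nil => exact absurd rfl h
  | cons e tl => rw [pvJoin_labels_suffix, pvRender, pvFoldStr]

-- ===== VERDICT (by name: the statement is the Claim_ definition above) =====
theorem analyze_side_effects_py_spec : Claim_equal_analyze_side_effects_py := by
  intro mn sl mi _
  unfold Spec_analyze_side_effects_py analyze_side_effects_py analyze_side_effects_py_alt
  by_cases h : sl = []
  · simp [h]
  · simp only [if_neg h]
    set serious := (PySem.Dict.mk mi).getD "serious_side_effects" [] with hser
    set common := (PySem.Dict.mk mi).getD "common_side_effects" [] with hcom
    rw [pvFold_mild serious common sl []]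
    have hmap : sl.map (pvLabel serious common) ≠ [] := by simpa using h
    by_cases hS : sl.any (pvHits serious) = true
    · simp only [hS, if_true, List.nil_append]
      rw [pvJoin_append_one _ _ hmap, pvJoin_labels serious common sl h]
      simp
    · by_cases hC : sl.any (pvHits common) = true
      · simp only [hS, hC, Bool.false_eq_true, if_false, if_true, List.nil_append,
          if_neg (by decide : ¬("moderate" : String) = "severe")]
        rw [pvJoin_append_one _ _ hmap, pvJoin_labels serious common sl h]
        simp
      · simp only [hS, hC, Bool.false_eq_true, if_false, List.nil_append,
          if_neg (by decide : ¬("mild" : String) = "severe"),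
          if_neg (by decide : ¬("mild" : String) = "moderate")]
        rw [pvJoin_labels serious common sl h]
        simp
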